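-- pv_equiv track=rewrite | github.com/kennijia/new-ner | BERT-LSTM-CRF/ablation_study.py | extract_text_matched_candidates
-- ===== SOURCE A (Python) =====
-- from typing import Dict, List, Any, Tuple
--
-- def extract_text_matched_candidates(retrieved_texts: List[Dict[str, Any]],
--                                    candidates: List[str],
--                                    max_matches: int = 10) -> List[str]:
--     if not retrieved_texts:
--         return []
--     joined = "\n".join([str(x.get("text", "")) for x in retrieved_texts])
--     out: List[str] = []
--     for c in candidates:
--         if c and c in joined:
--             out.append(c)
--             if len(out) >= max_matches:
--                 break
--     return out
-- ===== SOURCE B (Python) =====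
-- from typing import Dict, List, Any
--
-- def extract_text_matched_candidates(retrieved_texts: List[Dict[str, Any]],
--                                     candidates: List[str],
--                                     max_matches: int = 10) -> List[str]:
--     if not retrieved_texts:
--         return []
--     joined = "\n".join(str(x.get("text", "")) for x in retrieved_texts)
--     # index: the set of every window of the joined text at each needed length
--     lens = {len(c) for c in candidates if c}
--     subs = set()
--     for l in lens:
--         for i in range(len(joined) - l + 1):
--             subs.add(joined[i:i + l])
--     matched = [c for c in candidates if c in subs]
--     return matched[:max_matches] if max_matches > 0 else []
-- ===== Notes on version B (the rewrite author's own statement) =====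
-- stated objective: alternative
-- what changed: B precomputes a hash set of all windows of the joined text at each distinct candidate length, so each candidate is decided by one set lookup instead of a substring scan over the joined text; a non-positive cap yields [].
-- intended difference: When max_matches <= 0 and some non-empty candidate occurs in the joined text, A appends the first match before its post-append break fires and returns that singleton, while B returns [], the intended result of asking for at most max_matches <= 0 matches. — e.g. on extract_text_matched_candidates([[("text", "ab")]], ["a"], 0): A returns ["a"], B returns []
import Mathlib
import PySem

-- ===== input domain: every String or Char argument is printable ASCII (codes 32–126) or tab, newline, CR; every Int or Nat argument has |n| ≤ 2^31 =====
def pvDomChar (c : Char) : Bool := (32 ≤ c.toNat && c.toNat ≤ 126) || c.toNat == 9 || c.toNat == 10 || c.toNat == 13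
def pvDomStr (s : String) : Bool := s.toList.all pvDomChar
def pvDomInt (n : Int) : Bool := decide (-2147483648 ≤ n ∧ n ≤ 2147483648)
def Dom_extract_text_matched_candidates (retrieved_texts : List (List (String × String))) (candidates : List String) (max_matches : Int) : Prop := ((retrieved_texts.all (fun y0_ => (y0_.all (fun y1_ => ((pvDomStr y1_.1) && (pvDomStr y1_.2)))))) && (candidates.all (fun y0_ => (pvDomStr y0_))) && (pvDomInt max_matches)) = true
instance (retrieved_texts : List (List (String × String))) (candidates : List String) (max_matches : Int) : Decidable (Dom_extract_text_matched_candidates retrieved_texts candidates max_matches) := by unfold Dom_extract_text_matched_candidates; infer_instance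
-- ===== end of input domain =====

-- B replaces A's per-candidate substring scan by a precomputed set of all windows of the
-- joined text at each distinct candidate length (one set lookup per candidate), and drops
-- matches entirely for a non-positive cap (objective: alternative); return values only.

-- shared helper: joined = "\n".join(str(x.get("text", "")) for x in retrieved_texts)
def pvJoined (retrieved_texts : List (List (String × String))) : String :=
  PySem.Str.join "\n" (retrieved_texts.map (fun x => PySem.Dict.getD (PySem.Dict.mk x) "text" ""))

-- ===== PORT A =====
-- the Python condition 'c and c in joined'
def pvMatch (joined : String) (c : String) : Bool :=
  c ≠ "" && PySem.Str.isIn c joined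

-- A's for-loop over candidates with accumulator 'out' and early 'break'
def pvALoop (joined : String) (max_matches : Int) : List String → List String → List String
  | out, [] => out
  | out, c :: cs =>
    if pvMatch joined c then
      let out' := out ++ [c]
      if (out'.length : Int) ≥ max_matches then out' else pvALoop joined max_matches out' cs
    else pvALoop joined max_matches out cs

def extract_text_matched_candidates (retrieved_texts : List (List (String × String))) (candidates : List String) (max_matches : Int) : List String :=
  if retrieved_texts = [] then []
  else pvALoop (pvJoined retrieved_texts) max_matches [] candidates

-- ===== PORT B =====
-- lens = {len(c) for c in candidates if c}
def pvLens (candidates : List String) : PySem.Set Int :=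
  PySem.Set.ofList ((candidates.filter (fun c => c ≠ "")).map (fun c => PySem.Str.len c))

-- subs = {joined[i:i+l] for l in lens for i in range(len(joined) - l + 1)}
def pvSubs (joined : String) (lens : PySem.Set Int) : PySem.Set String :=
  lens.foldl
    (fun s l =>
      (PySem.List.pyRange 0 (PySem.Str.len joined - l + 1) 1).foldl
        (fun s i => PySem.Set.add s (PySem.Str.slice joined (some i) (some (i + l)))) s)
    PySem.Set.empty

def extract_text_matched_candidates_alt (retrieved_texts : List (List (String × String))) (candidates : List String) (max_matches : Int) : List String :=
  if retrieved_texts = [] then []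
  else
    let joined := pvJoined retrieved_texts
    let subs := pvSubs joined (pvLens candidates)
    let matched := candidates.filter (fun c => PySem.Set.contains subs c)
    if max_matches > 0 then PySem.List.slice matched none (some max_matches) else []

-- ===== PRECONDITION & SPEC =====
-- With a non-positive cap A still appends the FIRST matching candidate before its
-- post-append break fires (returning a singleton although max_matches ≤ 0); B returns
-- the intended empty list there, since at most max_matches candidates were requested.
def D_extract_text_matched_candidates (retrieved_texts : List (List (String × String))) (candidates : List String) (max_matches : Int) : Prop :=
  max_matches ≤ 0 ∧ retrieved_texts ≠ [] ∧
    ∃ c ∈ candidates, c ≠ "" ∧ PySem.Str.isIn c (pvJoined retrieved_texts) = true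
instance (retrieved_texts : List (List (String × String))) (candidates : List String) (max_matches : Int) : Decidable (D_extract_text_matched_candidates retrieved_texts candidates max_matches) := by unfold D_extract_text_matched_candidates; infer_instance

def Spec_extract_text_matched_candidates (retrieved_texts : List (List (String × String))) (candidates : List String) (max_matches : Int) (out : List String) : Prop := ¬ D_extract_text_matched_candidates retrieved_texts candidates max_matches → out = extract_text_matched_candidates_alt retrieved_texts candidates max_matches
instance (retrieved_texts : List (List (String × String))) (candidates : List String) (max_matches : Int) (out : List String) : Decidable (Spec_extract_text_matched_candidates retrieved_texts candidates max_matches out) := by unfold Spec_extract_text_matched_candidates; infer_instance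

def pvDiffWitness_extract_text_matched_candidates : (List (List (String × String))) × List String × Int :=
  ([[("text", "ab")]], ["a"], 0)
def pvDiffWitnessOut_extract_text_matched_candidates : (List String) × (List String) := (["a"], [])

-- ===== CLAIM (what is proved, stated in full; the proofs are below) =====
def Claim_unchanged_extract_text_matched_candidates : Prop := ∀ (retrieved_texts : List (List (String × String))) (candidates : List String) (max_matches : Int), Dom_extract_text_matched_candidates retrieved_texts candidates max_matches → Spec_extract_text_matched_candidates retrieved_texts candidates max_matches (extract_text_matched_candidates retrieved_texts candidates max_matches)
def Claim_changed_extract_text_matched_candidates : Prop := Dom_extract_text_matched_candidates (pvDiffWitness_extract_text_matched_candidates.1) (pvDiffWitness_extract_text_matched_candidates.2.1) (pvDiffWitness_extract_text_matched_candidates.2.2) ∧ D_extract_text_matched_candidates (pvDiffWitness_extract_text_matched_candidates.1) (pvDiffWitness_extract_text_matched_candidates.2.1) (pvDiffWitness_extract_text_matched_candidates.2.2) ∧ extract_text_matched_candidates (pvDiffWitness_extract_text_matched_candidates.1) (pvDiffWitness_extract_text_matched_candidates.2.1) (pvDiffWitness_extract_text_matched_candidates.2.2) = pvDiffWitnessOut_extract_text_matched_candidates.1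 ∧ extract_text_matched_candidates_alt (pvDiffWitness_extract_text_matched_candidates.1) (pvDiffWitness_extract_text_matched_candidates.2.1) (pvDiffWitness_extract_text_matched_candidates.2.2) = pvDiffWitnessOut_extract_text_matched_candidates.2 ∧ pvDiffWitnessOut_extract_text_matched_candidates.1 ≠ pvDiffWitnessOut_extract_text_matched_candidates.2
def Claim_exact_extract_text_matched_candidates : Prop := ∀ (retrieved_texts : List (List (String × String))) (candidates : List String) (max_matches : Int), Dom_extract_text_matched_candidates retrieved_texts candidates max_matches → D_extract_text_matched_candidates retrieved_texts candidates max_matches → extract_text_matched_candidates retrieved_texts candidates max_matches ≠ extract_text_matched_candidates_alt retrieved_texts candidates max_matches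

-- ===== LEMMAS AND PROOFS =====

-- membership in the inner window-collecting fold
theorem mem_foldl_add_window (joined : String) (l : Int) (r : List Int)
    (s : PySem.Set String) (c : String) :
    (c ∈ r.foldl (fun s i => PySem.Set.add s (PySem.Str.slice joined (some i) (some (i + l)))) s)
      ↔ c ∈ s ∨ ∃ i ∈ r, PySem.Str.slice joined (some i) (some (i + l)) = c := by
  induction r generalizing s with
  | nil => simp
  | cons i r ih =>
    simp only [List.foldl_cons, ih, PySem.Set.mem_add, List.mem_cons]
    constructor
    · rintro (⟨h | h⟩ | ⟨j, hj, hw⟩)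
      · exact Or.inl h
      · exact Or.inr ⟨i, Or.inl rfl, h.symm⟩
      · exact Or.inr ⟨j, Or.inr hj, hw⟩
    · rintro (h | ⟨j, (rfl | hj), hw⟩)
      · exact Or.inl (Or.inl h)
      · exact Or.inl (Or.inr hw.symm)
      · exact Or.inr ⟨j, hj, hw⟩

-- membership in the full index
theorem mem_pvSubs (joined : String) (lens : PySem.Set Int) (c : String) :
    c ∈ pvSubs joined lens
      ↔ ∃ l ∈ lens, ∃ i, 0 ≤ i ∧ i < PySem.Str.len joined - l + 1 ∧
          PySem.Str.slice joined (some i) (some (i + l)) = c := by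
  unfold pvSubs
  have : ∀ (ls : List Int) (s : PySem.Set String),
      (c ∈ ls.foldl (fun s l =>
        (PySem.List.pyRange 0 (PySem.Str.len joined - l + 1) 1).foldl
          (fun s i => PySem.Set.add s (PySem.Str.slice joined (some i) (some (i + l)))) s) s)
      ↔ c ∈ s ∨ ∃ l ∈ ls, ∃ i, 0 ≤ i ∧ i < PySem.Str.len joined - l + 1 ∧
          PySem.Str.slice joined (some i) (some (i + l)) = c := by
    intro ls
    induction ls with
    | nil => simp
    | cons l ls ih =>
      intro s
      simp only [List.foldl_cons, ih, mem_foldl_add_window, PySem.List.mem_pyRange_one,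
        List.mem_cons]
      constructor
      · rintro ((h | ⟨i, ⟨h0, h1⟩, hw⟩) | ⟨l', hl', hi⟩)
        · exact Or.inl h
        · exact Or.inr ⟨l, Or.inl rfl, i, h0, h1, hw⟩
        · exact Or.inr ⟨l', Or.inr hl', hi⟩
      · rintro (h | ⟨l', (rfl | hl'), i, h0, h1, hw⟩)
        · exact Or.inl (Or.inl h)
        · exact Or.inl (Or.inr ⟨i, ⟨h0, h1⟩, hw⟩)
        · exact Or.inr ⟨l', hl', i, h0, h1, hw⟩
  simpa using this lens PySem.Set.empty

-- every length in the index is the length of some non-empty candidate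
theorem mem_pvLens (candidates : List String) (l : Int) :
    l ∈ pvLens candidates ↔ ∃ c ∈ candidates, c ≠ "" ∧ PySem.Str.len c = l := by
  unfold pvLens
  simp only [PySem.Set.mem_ofList, List.mem_map, List.mem_filter]
  constructor
  · rintro ⟨c, ⟨hc, hne⟩, rfl⟩
    exact ⟨c, hc, by simpa using hne, rfl⟩
  · rintro ⟨c, hc, hne, rfl⟩
    exact ⟨c, ⟨hc, by simpa using hne⟩, rfl⟩

-- a window of positive length l at an admissible position is the corresponding drop/take
theorem window_toList (joined : String) (i l : Int) (h0 : 0 ≤ i) (hl : 0 ≤ l)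
    (h1 : i < PySem.Str.len joined - l + 1) :
    (PySem.Str.slice joined (some i) (some (i + l))).toList
      = (joined.toList.drop i.toNat).take l.toNat := by
  rw [PySem.Str.toList_slice, PySem.Chars.slice_eq_listSlice]
  have hi : i = ((i.toNat : Nat) : Int) := by omega
  have hl' : l = ((l.toNat : Nat) : Int) := by omega
  rw [hi, hl', PySem.List.slice_natCast_add]
  simp
  have e1 : (max l 0).toNat = l.toNat := by omega
  have e2 : (max i 0).toNat = i.toNat := by omega
  rw [e1, e2]

-- the index lookup coincides with A's 'c and c in joined' for every candidate
theorem contains_pvSubs_eq (candidates : List String) (joined c : String)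
    (hc : c ∈ candidates) :
    PySem.Set.contains (pvSubs joined (pvLens candidates)) c = pvMatch joined c := by
  have hlen : PySem.Str.len joined = (joined.toList.length : Int) := by simp
  by_cases hne : c = ""
  · subst hne
    have hmem : ("" : String) ∉ pvSubs joined (pvLens candidates) := by
      rw [mem_pvSubs]
      rintro ⟨l, hl, i, h0, h1, hw⟩
      obtain ⟨c', _, hne', hlc⟩ := (mem_pvLens candidates l).mp hl
      have hlpos : 1 ≤ l := by
        have hc' : PySem.Str.len c' = (c'.toList.length : Int) := by simp
        have hne'' : c'.toList ≠ [] := fun h => hne' (String.toList_inj.mp (by simpa using h))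
        have := List.length_pos_of_ne_nil hne''
        omega
      have hw' := congrArg String.toList hw
      rw [window_toList joined i l h0 (by omega) h1] at hw'
      have hlen2 : ((joined.toList.drop i.toNat).take l.toNat).length = l.toNat := by
        rw [List.length_take, List.length_drop]
        omega
      rw [hw'] at hlen2
      simp at hlen2
      omega
    have h2 : PySem.Set.contains (pvSubs joined (pvLens candidates)) "" = false := by
      rw [Bool.eq_false_iff]
      intro h
      exact hmem ((PySem.Set.contains_iff _ _).mp h)
    rw [h2]
    simp [pvMatch]
  · have hl0 : PySem.Str.len c ∈ pvLens candidates :=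
      (mem_pvLens candidates (PySem.Str.len c)).mpr ⟨c, hc, hne, rfl⟩
    have hclen : PySem.Str.len c = (c.toList.length : Int) := by simp
    have hiff : (c ∈ pvSubs joined (pvLens candidates)) ↔ PySem.Str.isIn c joined = true := by
      rw [mem_pvSubs, PySem.Str.isIn_iff_infix]
      constructor
      · rintro ⟨l, hl, i, h0, h1, hw⟩
        obtain ⟨c', _, hne', hlc⟩ := (mem_pvLens candidates l).mp hl
        have hlnn : 0 ≤ l := by
          have : PySem.Str.len c' = (c'.toList.length : Int) := by simp
          omega
        have hw' := congrArg String.toList hw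
        rw [window_toList joined i l h0 hlnn h1] at hw'
        have hpre : c.toList <+: joined.toList.drop i.toNat := by
          rw [← hw']; exact List.take_prefix _ _
        exact hpre.isInfix.trans (List.drop_suffix i.toNat joined.toList).isInfix
      · rintro ⟨s, t, hst⟩
        refine ⟨PySem.Str.len c, hl0, (s.length : Int), Int.natCast_nonneg _, ?_, ?_⟩
        · have : s.length + c.toList.length ≤ joined.toList.length := by
            rw [← hst]; simp
          omega
        · apply String.toList_inj.mp
          rw [hclen, PySem.Str.toList_slice, PySem.Chars.slice_eq_listSlice,
            PySem.List.slice_natCast_add, ← hst]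
          rw [List.append_assoc, List.drop_left, List.take_left]
    by_cases hin : PySem.Str.isIn c joined = true
    · have h1 : PySem.Set.contains (pvSubs joined (pvLens candidates)) c = true :=
        (PySem.Set.contains_iff _ _).mpr (hiff.mpr hin)
      rw [h1]
      unfold pvMatch
      rw [hin]
      simp [hne]
    · have h2 : PySem.Set.contains (pvSubs joined (pvLens candidates)) c = false := by
        rw [Bool.eq_false_iff]
        intro h
        exact hin (hiff.mp ((PySem.Set.contains_iff _ _).mp h))
      rw [h2]
      unfold pvMatch
      rw [Bool.eq_false_iff.mpr hin]
      simp

-- B's port, re-expressed through A's match predicate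
theorem alt_eq (rts : List (List (String × String))) (cands : List String) (mm : Int)
    (hr : rts ≠ []) :
    extract_text_matched_candidates_alt rts cands mm
      = if mm > 0
        then PySem.List.slice (cands.filter (fun c => pvMatch (pvJoined rts) c)) none (some mm)
        else [] := by
  unfold extract_text_matched_candidates_alt
  simp only [hr, if_false]
  have : cands.filter (fun c => PySem.Set.contains (pvSubs (pvJoined rts) (pvLens cands)) c)
      = cands.filter (fun c => pvMatch (pvJoined rts) c) :=
    List.filter_congr (fun c hc => contains_pvSubs_eq cands (pvJoined rts) c hc)
  rw [this]

-- A's loop with a positive remaining budget is filter-then-take.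
theorem pvALoop_eq_take (joined : String) (mm : Int) (cs out : List String)
    (h : (out.length : Int) < mm) :
    pvALoop joined mm out cs
      = out ++ (cs.filter (fun c => pvMatch joined c)).take (mm - out.length).toNat := by
  induction cs generalizing out with
  | nil => simp [pvALoop]
  | cons c cs ih =>
    by_cases hc : pvMatch joined c
    · simp only [pvALoop, hc, if_true, List.filter_cons_of_pos hc]
      by_cases hb : ((out ++ [c]).length : Int) ≥ mm
      · have h1 : (mm - out.length).toNat = 1 := by
          simp at hb; omega
        simp [h1]
        intro hlt
        exfalso
        simp at hb
        omega
      · have h2 : ((out ++ [c]).length : Int) < mm := by simp at hb ⊢; omega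
        rw [if_neg hb, ih _ h2]
        have h3 : (mm - out.length).toNat = (mm - (out ++ [c]).length).toNat + 1 := by
          simp; omega
        simp [h3]
    · simp only [pvALoop, hc, if_false, List.filter_cons_of_neg hc]
      exact ih _ h

-- A's loop returns its accumulator unchanged when nothing matches.
theorem pvALoop_no_match (joined : String) (mm : Int) (cs out : List String)
    (h : ∀ c ∈ cs, pvMatch joined c = false) :
    pvALoop joined mm out cs = out := by
  induction cs with
  | nil => rfl
  | cons c cs ih =>
    have hc := h c (by simp)
    simp only [pvALoop, hc, if_false]
    exact ih (fun x hx => h x (by simp [hx]))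

-- With an exhausted budget A returns the accumulator extended by the first match.
theorem pvALoop_first_match (joined : String) (mm : Int) (cs out : List String)
    (hm : mm ≤ (out.length : Int) + 1)
    (h : ∃ c ∈ cs, pvMatch joined c = true) :
    ∃ c, pvALoop joined mm out cs = out ++ [c] := by
  induction cs with
  | nil => simp at h
  | cons c cs ih =>
    by_cases hc : pvMatch joined c
    · refine ⟨c, ?_⟩
      have hb : (((out ++ [c]).length : Int) ≥ mm) := by simp; omega
      simp [pvALoop, hc]
      intro hlt
      exfalso
      simp at hb
      omega
    · simp only [pvALoop, hc, if_false]
      obtain ⟨x, hx, hpx⟩ := h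
      rcases List.mem_cons.mp hx with rfl | hx
      · exact absurd hpx hc
      · exact ih ⟨x, hx, hpx⟩

-- ===== VERDICT (by name: the statement is the Claim_ definition above) =====
theorem extract_text_matched_candidates_spec : Claim_unchanged_extract_text_matched_candidates := by
  intro rts cands mm _ hnd
  unfold extract_text_matched_candidates
  by_cases hr : rts = []
  · simp [hr, extract_text_matched_candidates_alt]
  · rw [alt_eq rts cands mm hr]
    simp only [hr, if_neg, if_false]
    unfold D_extract_text_matched_candidates at hnd
    push_neg at hnd
    by_cases hm : mm > 0
    · rw [pvALoop_eq_take _ _ _ _ (by simpa using hm),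
        PySem.List.slice_to _ (by omega)]
      simp
      exact fun h => absurd h (by omega)
    · have hnm : ∀ c ∈ cands, pvMatch (pvJoined rts) c = false := by
        intro c hc
        have := hnd (by omega) hr c hc
        by_cases hce : c = ""
        · simp [pvMatch, hce]
        · simp [pvMatch, hce]
          exact Bool.eq_false_iff.mpr (this hce)
      rw [pvALoop_no_match _ _ _ _ hnm]
      simp [hm]

theorem extract_text_matched_candidates_changed : Claim_changed_extract_text_matched_candidates := by
  unfold Claim_changed_extract_text_matched_candidates; decide

theorem extract_text_matched_candidates_tight : Claim_exact_extract_text_matched_candidates := by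
  intro rts cands mm _ hd
  obtain ⟨hm, hr, c, hc, hne, hin⟩ := hd
  unfold extract_text_matched_candidates
  rw [alt_eq rts cands mm hr]
  simp only [hr, if_neg, if_false]
  have hmm : ¬ mm > 0 := by omega
  obtain ⟨x, hx⟩ := pvALoop_first_match (pvJoined rts) mm cands []
    (by simp; omega) ⟨c, hc, by simp [pvMatch, hne]; exact hin⟩
  simp [hx, hmm]
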